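-- pv_equiv track=rewrite | github.com/duangduangda/Thor | thor/array/ac_747.py | dominantIndex1
-- ===== SOURCE A (Python) =====
-- def dominantIndex1(nums: [int]) -> int:
-- 	if nums is None:
-- 		return -1
-- 	else:
-- 		max_val = max(nums)
-- 		if all(max_val >= 2 * x for x in nums if x != max_val):
-- 			return nums.index(max_val)
-- 		else:
-- 			return -1
-- ===== SOURCE B (Python) =====
-- def dominantIndex1(nums: [int]) -> int:
--     if nums is None:
--         return -1
--     first = second = None
--     idx = -1
--     for i, x in enumerate(nums):
--         if first is None or x > first:
--             second = first
--             first = x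
--             idx = i
--         elif x != first and (second is None or x > second):
--             second = x
--     if second is not None and 2 * second > first:
--         return -1
--     return idx
-- ===== Notes on version B (the rewrite author's own statement) =====
-- stated objective: alternative
-- what changed: Replaced A's three scans (max, all-generator over the list, list.index) by one pass over enumerate(nums) that maintains the running max with its first index and the largest element strictly below it, then decides from those two values.
import Mathlib
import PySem

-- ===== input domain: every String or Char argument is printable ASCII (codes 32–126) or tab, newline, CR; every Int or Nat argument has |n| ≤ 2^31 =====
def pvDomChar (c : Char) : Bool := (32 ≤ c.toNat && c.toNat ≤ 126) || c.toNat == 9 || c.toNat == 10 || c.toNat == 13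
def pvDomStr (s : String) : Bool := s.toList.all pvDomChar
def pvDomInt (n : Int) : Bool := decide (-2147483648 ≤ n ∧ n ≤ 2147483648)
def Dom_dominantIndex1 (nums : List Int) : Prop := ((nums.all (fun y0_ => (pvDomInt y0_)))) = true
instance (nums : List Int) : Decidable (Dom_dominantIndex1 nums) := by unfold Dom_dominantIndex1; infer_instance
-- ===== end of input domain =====

-- B replaces A's three scans (max, all-check, index) by one pass keeping the running max,
-- its first index and the runner-up; same return value on every nonempty list (objective: alternative).
-- The Python 'nums is None' branch is not representable for a List argument and is omitted in both ports.

-- ===== PORT A =====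
def dominantIndex1 (nums : List Int) : Int :=
  match PySem.List.max? nums (fun y => y) with
  | none => -1  -- Python raises ValueError on [], excluded by Pre_
  | some max_val =>
    if (nums.filter (fun x => decide (x ≠ max_val))).all (fun x => decide (max_val ≥ 2 * x)) then
      match PySem.List.index? nums max_val with
      | some i => (i : Int)
      | none => -1  -- unreachable: max_val ∈ nums
    else -1

-- ===== PORT B =====
-- loop body of Source B: state (first, second, idx), input (i, x) from enumerate;
-- the 'second is None or x > second' disjunction is transcribed as a match on second
def altStep (s : Option Int × Option Int × Int) (p : Int × Int) : Option Int × Option Int × Int :=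
  match s with
  | (first, second, idx) =>
    match first with
    | none => (some p.2, first, p.1)
    | some f =>
      if p.2 > f then (some p.2, some f, p.1)
      else
        match second with
        | none => if p.2 ≠ f then (first, some p.2, idx) else (first, second, idx)
        | some sv => if p.2 ≠ f ∧ p.2 > sv then (first, some p.2, idx) else (first, second, idx)

def dominantIndex1_alt (nums : List Int) : Int :=
  match (PySem.List.enumerate nums).foldl altStep (none, none, -1) with
  | (first, second, idx) =>
    match second with
    | none => idx
    | some sv => if 2 * sv > first.getD 0 then -1 else idx
    -- 'first.getD 0': whenever second is set, first is set too, matching Python's int comparison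

-- ===== PRECONDITION & SPEC =====
-- Pre_ excludes exactly the empty list, on which Python's max(nums) raises ValueError.
def Pre_dominantIndex1 (nums : List Int) : Prop := nums ≠ []
instance (nums : List Int) : Decidable (Pre_dominantIndex1 nums) := by unfold Pre_dominantIndex1; infer_instance
def pvWitness_dominantIndex1 : List Int := [3, 1, 0]

def Spec_dominantIndex1 (nums : List Int) (out : Int) : Prop := out = dominantIndex1_alt nums
instance (nums : List Int) (out : Int) : Decidable (Spec_dominantIndex1 nums out) := by unfold Spec_dominantIndex1; infer_instance

-- ===== CLAIM (what is proved, stated in full; the proofs are below) =====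
def Claim_equal_dominantIndex1 : Prop := ∀ (nums : List Int), Dom_dominantIndex1 nums → Pre_dominantIndex1 nums → Spec_dominantIndex1 nums (dominantIndex1 nums)

-- ===== LEMMAS AND PROOFS =====

-- max of a nonempty list, as A's running max computes it
def bigM : List Int → Int
  | [] => 0
  | x :: t => t.foldl max x

def smallF (l : List Int) : List Int := l.filter (fun y => decide (y < bigM l))

def smallS (l : List Int) : Option Int :=
  match smallF l with
  | [] => none
  | x :: t => some (t.foldl max x)

theorem foldl_max_mem (x : Int) (t : List Int) : t.foldl max x ∈ x :: t := by
  induction t generalizing x with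
  | nil => simp
  | cons y t ih =>
    simp only [List.foldl_cons]
    rcases List.mem_cons.mp (ih (max x y)) with h | h
    · rw [h]; rcases max_choice x y with hm | hm <;> simp [hm]
    · simp [h]

theorem le_foldl_max' (x : Int) (t : List Int) : ∀ y ∈ x :: t, y ≤ t.foldl max x := by
  induction t generalizing x with
  | nil => simp
  | cons z t ih =>
    intro y hy
    simp only [List.foldl_cons]
    have hbase : max x z ≤ List.foldl max (max x z) t := ih (max x z) (max x z) (by simp)
    rcases List.mem_cons.mp hy with h | h
    · exact le_trans (h ▸ le_max_left x z) hbase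
    · rcases List.mem_cons.mp h with h2 | h2
      · exact le_trans (h2 ▸ le_max_right x z) hbase
      · exact ih (max x z) y (List.mem_cons_of_mem _ h2)

theorem bigM_mem (l : List Int) (h : l ≠ []) : bigM l ∈ l := by
  match l with
  | x :: t => exact foldl_max_mem x t

theorem le_bigM (l : List Int) : ∀ y ∈ l, y ≤ bigM l := by
  match l with
  | [] => simp
  | x :: t => exact le_foldl_max' x t

theorem bigM_append (l : List Int) (h : l ≠ []) (y : Int) :
    bigM (l ++ [y]) = max (bigM l) y := by
  match l with
  | x :: t => simp [bigM, List.foldl_append]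

-- the invariant of B's single pass
theorem alt_inv (l : List Int) (h : l ≠ []) :
    (PySem.List.enumerate l).foldl altStep (none, none, -1) =
      (some (bigM l), smallS l, (((PySem.List.index? l (bigM l)).getD 0 : Nat) : Int)) := by
  induction l using List.reverseRecOn with
  | nil => exact absurd rfl h
  | append_singleton l y ih =>
    rcases eq_or_ne l [] with rfl | hl
    · simp [PySem.List.enumerate, bigM, smallS, smallF, altStep,
        PySem.List.index?_eq_idxOf?]
    · have hM := bigM_mem l hl
      have hle := le_bigM l
      rw [PySem.List.enumerate_append, List.foldl_append, ih hl]
      simp only [PySem.List.enumerate, List.foldl_cons, List.foldl_nil]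
      rcases lt_trichotomy (bigM l) y with hgt | heq | hlt
      · -- y is a new strict max
        have hnotmem : y ∉ l := fun hy => absurd (hle y hy) (by omega)
        have hbig : bigM (l ++ [y]) = y := by rw [bigM_append l hl y]; omega
        have hfilt : smallF (l ++ [y]) = l := by
          unfold smallF
          rw [hbig, List.filter_append]
          have h1 : l.filter (fun z => decide (z < y)) = l :=
            List.filter_eq_self.mpr (fun z hz => by
              have := hle z hz; simp; omega)
          simp [h1]
        have hS : smallS (l ++ [y]) = some (bigM l) := by
          unfold smallS
          rw [hfilt]
          match l, hl with
          | x :: t, _ => rfl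
        have hidx : PySem.List.index? (l ++ [y]) y = some l.length :=
          PySem.List.index?_append_singleton_self l y hnotmem
        simp only [altStep]
        rw [if_pos (by omega)]
        rw [hbig, hS, hidx]
        simp
      · -- y equals the current max: state unchanged
        subst heq
        have hbig : bigM (l ++ [bigM l]) = bigM l := by rw [bigM_append l hl]; omega
        have hfilt : smallF (l ++ [bigM l]) = smallF l := by
          unfold smallF
          rw [hbig, List.filter_append]; simp
        have hS : smallS (l ++ [bigM l]) = smallS l := by unfold smallS; rw [hfilt]
        have hidx : PySem.List.index? (l ++ [bigM l]) (bigM l) = PySem.List.index? l (bigM l) :=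
          PySem.List.index?_append_of_mem _ hM
        cases hsec : smallS l with
        | none =>
          simp only [altStep, hbig, hS, hsec, hidx]
          rw [if_neg (by omega), if_neg (by simp)]
        | some sv =>
          simp only [altStep, hbig, hS, hsec, hidx]
          rw [if_neg (by omega), if_neg (by simp)]
      · -- y below the current max: only the runner-up may change
        have hbig : bigM (l ++ [y]) = bigM l := by rw [bigM_append l hl]; omega
        have hfilt : smallF (l ++ [y]) = smallF l ++ [y] := by
          unfold smallF
          rw [hbig, List.filter_append]
          simp [hlt]
        have hidx : PySem.List.index? (l ++ [y]) (bigM l) = PySem.List.index? l (bigM l) :=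
          PySem.List.index?_append_of_mem _ hM
        match hSF : smallF l with
        | [] =>
          have hS : smallS l = none := by unfold smallS; rw [hSF]
          have hS' : smallS (l ++ [y]) = some y := by unfold smallS; rw [hfilt, hSF]; rfl
          simp only [altStep, hbig, hS, hS', hidx]
          rw [if_neg (by omega), if_pos (by omega)]
        | x :: t =>
          have hS : smallS l = some (t.foldl max x) := by unfold smallS; rw [hSF]
          have hS' : smallS (l ++ [y]) = some (max (t.foldl max x) y) := by
            unfold smallS; rw [hfilt, hSF]
            simp [List.foldl_append]
          simp only [altStep, hbig, hS, hS', hidx]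
          rw [if_neg (by omega)]
          rcases le_or_gt y (t.foldl max x) with hy | hy
          · rw [if_neg (by omega)]
            have hmx : max (List.foldl max x t) y = List.foldl max x t := by omega
            rw [hmx]
          · rw [if_pos ⟨by omega, hy⟩]
            have hmx : max (List.foldl max x t) y = y := by omega
            rw [hmx]

-- A's max? is bigM on nonempty lists
theorem maxq_eq_bigM (l : List Int) (h : l ≠ []) :
    PySem.List.max? l (fun y => y) = some (bigM l) := by
  match l with
  | x :: t => exact PySem.List.max?_id_cons x t

-- A's filter (≠ max) is exactly smallF
theorem filter_ne_eq_smallF (l : List Int) :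
    l.filter (fun x => decide (x ≠ bigM l)) = smallF l := by
  unfold smallF
  apply List.filter_congr
  intro z hz
  have := le_bigM l z hz
  simp only [decide_eq_decide]
  omega

theorem dominantIndex1_spec : Claim_equal_dominantIndex1 := by
  intro nums _ hpre
  unfold Spec_dominantIndex1 dominantIndex1 dominantIndex1_alt
  rw [alt_inv nums hpre, maxq_eq_bigM nums hpre]
  simp only
  have hM := bigM_mem nums hpre
  have hisome : (PySem.List.index? nums (bigM nums)).isSome :=
    (PySem.List.index?_isSome_iff nums (bigM nums)).mpr hM
  obtain ⟨i, hi⟩ := Option.isSome_iff_exists.mp hisome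
  rw [filter_ne_eq_smallF]
  rw [hi]
  match hSF : smallF nums with
  | [] =>
    have hS : smallS nums = none := by unfold smallS; rw [hSF]
    simp only [hS]
    simp
  | x :: t =>
    have hS : smallS nums = some (t.foldl max x) := by unfold smallS; rw [hSF]
    simp only [hS]
    have hmem := foldl_max_mem x t
    have hall := le_foldl_max' x t
    simp only [Option.getD_some]
    by_cases hc : 2 * t.foldl max x > bigM nums
    · rw [if_pos hc, if_neg ?_]
      intro hforall
      rw [List.all_eq_true] at hforall
      have := hforall _ hmem
      simp at this
      omega
    · rw [if_neg hc, if_pos ?_]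
      rw [List.all_eq_true]
      intro z hz
      have := hall z hz
      simp only [decide_eq_true_eq]
      omega
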